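-- pv_equiv track=rewrite | github.com/Am1anB/Container | eval_pick50.py | force_container
-- ===== SOURCE A (Python) =====
-- look_like_digit = {"O":"0","Q":"0","D":"0","I":"1","L":"1","Z":"2","S":"5","G":"6","B":"8"}
--
-- look_like_letter = {"0":"O","1":"I","2":"Z","5":"S","8":"B"}
--
-- def force_container(s):
--     u = s.upper()
--     buf = [r for r in u if r.isalpha() or r.isdigit()]
--     if len(buf) < 11: return ""
--     out = []
--     for r in buf[:4]:
--         if r.isdigit(): r = look_like_letter.get(r, "A")
--         out.append(r)
--     i = 4
--     while len(out) < 11 and i < len(buf):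
--         r = buf[i]
--         if r.isalpha(): r = look_like_digit.get(r, "0")
--         out.append(r); i += 1
--     return "".join(out)
-- ===== SOURCE B (Python) =====
-- look_like_digit = {"O":"0","Q":"0","D":"0","I":"1","L":"1","Z":"2","S":"5","G":"6","B":"8"}
--
-- look_like_letter = {"0":"O","1":"I","2":"Z","5":"S","8":"B"}
--
-- # Single fused pass over the raw string: normalize each char on the fly by its
-- # alphanumeric position and return early at the 11th one; no buffer, no slices.
-- def force_container(s):
--     out = []
--     k = 0
--     for c in s:
--         u = c.upper()
--         if u.isalnum():
--             if k < 4: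
--                 out.append(look_like_letter.get(u, "A") if u.isdigit() else u)
--             else:
--                 out.append(look_like_digit.get(u, "0") if u.isalpha() else u)
--             k += 1
--             if k == 11:
--                 return "".join(out)
--     return ""
-- ===== Notes on version B (the rewrite author's own statement) =====
-- stated objective: faster
-- what changed: Replaces A's staged passes (upper+filter into a buffer, a length guard, a head loop over buf[:4] and an index/while tail loop) by one fused pass over the raw string that normalizes each character on the fly by its alphanumeric position and returns as soon as the 11th alphanumeric is seen.
import Mathlib
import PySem

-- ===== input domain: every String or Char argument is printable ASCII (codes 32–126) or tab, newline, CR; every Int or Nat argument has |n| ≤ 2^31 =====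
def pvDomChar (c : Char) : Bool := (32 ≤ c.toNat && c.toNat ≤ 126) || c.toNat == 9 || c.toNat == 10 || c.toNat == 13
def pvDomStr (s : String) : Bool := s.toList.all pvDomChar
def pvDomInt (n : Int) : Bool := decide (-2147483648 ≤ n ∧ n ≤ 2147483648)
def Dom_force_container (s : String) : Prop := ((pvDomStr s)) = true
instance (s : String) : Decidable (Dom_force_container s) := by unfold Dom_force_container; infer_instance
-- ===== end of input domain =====

-- B fuses A's staged passes into one pass over the raw string with a position counter and an early return (alternative decomposition).

-- ===== PORT A =====
def look_like_digit : PySem.Dict Char Char :=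
  PySem.Dict.mk [('O','0'),('Q','0'),('D','0'),('I','1'),('L','1'),('Z','2'),('S','5'),('G','6'),('B','8')]

def look_like_letter : PySem.Dict Char Char :=
  PySem.Dict.mk [('0','O'),('1','I'),('2','Z'),('5','S'),('8','B')]

-- the while loop: while len(out) < 11 and i < len(buf): …
def fcA_tail (buf : List Char) (out : List Char) (i : Nat) : List Char :=
  if _h : out.length < 11 ∧ i < buf.length then
    let r := PySem.List.pyGetD buf (i : Int) ' '
    fcA_tail buf (out ++ [if PySem.Chars.isalpha r then look_like_digit.getD r '0' else r]) (i + 1)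
  else out
termination_by buf.length - i

def force_container (s : String) : String :=
  let u := PySem.Chars.upper s.toList
  let buf := u.filter (fun r => PySem.Chars.isalpha r || PySem.Chars.isdigit r)
  if buf.length < 11 then "" else
    let out := (PySem.List.slice buf none (some 4)).foldl
      (fun out r => out ++ [if PySem.Chars.isdigit r then look_like_letter.getD r 'A' else r]) []
    String.ofList (fcA_tail buf out 4)

-- ===== PORT B =====
-- one pass: for c in s: u = c.upper(); if u.isalnum(): append the mapped char, count, return at 11
def fcB_go : List Char → List Char → Nat → String
  | [], _, _ => ""
  | c :: rest, out, k =>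
    let u := PySem.Chars.upperChar c
    if PySem.Chars.isalnum u then
      let m := if k < 4 then (if PySem.Chars.isdigit u then look_like_letter.getD u 'A' else u)
               else (if PySem.Chars.isalpha u then look_like_digit.getD u '0' else u)
      if k + 1 = 11 then String.ofList (out ++ [m])
      else fcB_go rest (out ++ [m]) (k + 1)
    else fcB_go rest out k

def force_container_alt (s : String) : String := fcB_go s.toList [] 0

-- ===== PRECONDITION & SPEC =====
def Spec_force_container (s : String) (out : String) : Prop := out = force_container_alt s
instance (s : String) (out : String) : Decidable (Spec_force_container s out) := by unfold Spec_force_container; infer_instance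

-- ===== CLAIM (what is proved, stated in full; the proofs are below) =====
def Claim_equal_force_container : Prop := ∀ (s : String), Dom_force_container s → Spec_force_container s (force_container s)

-- ===== LEMMAS AND PROOFS =====

-- A's buffer, as a function of the remaining raw characters
def fcBuf (l : List Char) : List Char :=
  (PySem.Chars.upper l).filter (fun r => PySem.Chars.isalpha r || PySem.Chars.isdigit r)

-- the position-dependent map both programs apply
def fcMapFrom : Nat → List Char → List Char
  | _, [] => []
  | k, c :: cs =>
    (if k < 4 then (if PySem.Chars.isdigit c then look_like_letter.getD c 'A' else c)
     else (if PySem.Chars.isalpha c then look_like_digit.getD c '0' else c)) :: fcMapFrom (k + 1) cs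

lemma fcBuf_cons (c : Char) (l : List Char) :
    fcBuf (c :: l) =
      if PySem.Chars.isalnum (PySem.Chars.upperChar c)
      then PySem.Chars.upperChar c :: fcBuf l else fcBuf l := by
  have : PySem.Chars.isalnum (PySem.Chars.upperChar c)
      = (PySem.Chars.isalpha (PySem.Chars.upperChar c) || PySem.Chars.isdigit (PySem.Chars.upperChar c)) := rfl
  simp only [fcBuf, PySem.Chars.upper, List.map_cons, List.filter_cons, this]

-- B's loop computes the guard and the position-mapped prefix of A's buffer
lemma fcB_go_eq (l : List Char) : ∀ (out : List Char) (k : Nat), k < 11 →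
    fcB_go l out k =
      if (fcBuf l).length + k < 11 then ""
      else String.ofList (out ++ fcMapFrom k ((fcBuf l).take (11 - k))) := by
  induction l with
  | nil =>
    intro out k hk
    simp [fcB_go, fcBuf, PySem.Chars.upper]
    omega
  | cons c rest ih =>
    intro out k hk
    rw [fcB_go, fcBuf_cons]
    by_cases hal : PySem.Chars.isalnum (PySem.Chars.upperChar c) = true
    · simp only [hal, if_true]
      by_cases h11 : k + 1 = 11
      · rw [if_pos h11]
        have hlen : ¬ ((PySem.Chars.upperChar c :: fcBuf rest).length + k < 11) := by
          simp; omega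
        rw [if_neg hlen]
        have ht : 11 - k = 1 := by omega
        rw [ht]
        simp [fcMapFrom]
      · rw [if_neg h11]
        rw [ih (out ++ [_]) (k + 1) (by omega)]
        have ht : 11 - k = (11 - (k + 1)) + 1 := by omega
        rw [ht]
        simp only [List.length_cons, List.take_succ_cons, fcMapFrom, List.append_assoc,
          List.singleton_append]
        congr 2
        omega
    · simp only [Bool.not_eq_true] at hal
      simp only [hal, Bool.false_eq_true, if_false]
      exact ih out k hk
-- the position map splits into A's two stages
lemma fcMapFrom_split : ∀ (xs : List Char) (k : Nat),
    fcMapFrom k xs =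
      (xs.take (4 - k)).map (fun r => if PySem.Chars.isdigit r then look_like_letter.getD r 'A' else r)
      ++ (xs.drop (4 - k)).map (fun r => if PySem.Chars.isalpha r then look_like_digit.getD r '0' else r) := by
  intro xs
  induction xs with
  | nil => intro k; simp [fcMapFrom]
  | cons c cs ih =>
    intro k
    by_cases hk : k < 4
    · have h4 : 4 - k = (4 - (k + 1)) + 1 := by omega
      rw [fcMapFrom, if_pos hk, h4, List.take_succ_cons, List.drop_succ_cons, List.map_cons,
        List.cons_append, ih (k + 1)]
    · have h4 : 4 - k = 0 := by omega
      have h4' : 4 - (k + 1) = 0 := by omega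
      simp only [fcMapFrom, if_neg hk, h4, h4', List.take_zero, List.drop_zero,
        List.map_nil, List.nil_append, List.map_cons, ih (k + 1)]

-- the while loop appends the tail-mapped characters buf[i:11] when len(out) = i
lemma fcA_tail_eq (buf : List Char) : ∀ (k i : Nat) (out : List Char), buf.length - i ≤ k →
    out.length = i →
    fcA_tail buf out i = out ++ ((buf.drop i).take (11 - i)).map
      (fun r => if PySem.Chars.isalpha r then look_like_digit.getD r '0' else r) := by
  intro k
  induction k with
  | zero =>
    intro i out hk ho
    rw [fcA_tail.eq_def]
    have hni : ¬ (i < buf.length) := by omega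
    rw [dif_neg (by tauto)]
    rw [List.drop_eq_nil_of_le (by omega)]
    simp
  | succ k ih =>
    intro i out hk ho
    rw [fcA_tail.eq_def]
    by_cases hc : out.length < 11 ∧ i < buf.length
    · rw [dif_pos hc]
      rw [ih (i + 1) _ (by omega) (by simp [ho])]
      rw [PySem.List.pyGetD_natCast]
      have hget : buf.getD i ' ' = buf[i]'hc.2 := List.getD_eq_getElem buf ' ' hc.2
      rw [hget]
      rw [List.drop_eq_getElem_cons hc.2]
      have h11 : 11 - i = (11 - (i + 1)) + 1 := by omega
      rw [h11, List.take_succ_cons, List.map_cons]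
      simp
    · rw [dif_neg hc]
      rcases (by omega : 11 ≤ i ∨ buf.length ≤ i) with h | h
      · rw [(by omega : 11 - i = 0)]
        simp
      · rw [List.drop_eq_nil_of_le h]
        simp

-- ===== VERDICT (by name: the statement is the Claim_ definition above) =====
theorem force_container_spec : Claim_equal_force_container := by
  unfold Claim_equal_force_container Spec_force_container
  intro s _
  unfold force_container force_container_alt
  rw [fcB_go_eq s.toList [] 0 (by omega)]
  dsimp only
  have hbufdef : (PySem.Chars.upper s.toList).filter
      (fun r => PySem.Chars.isalpha r || PySem.Chars.isdigit r) = fcBuf s.toList := rfl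
  rw [hbufdef]
  generalize fcBuf s.toList = buf
  by_cases hlen : buf.length < 11
  · rw [if_pos hlen, if_pos (by omega)]
  · rw [if_neg hlen, if_neg (by omega)]
    rw [PySem.List.slice_to buf (show (0:Int) ≤ 4 by norm_num)]
    rw [(by decide : ((4 : Int)).toNat = 4)]
    rw [PySem.List.foldl_append_singleton_eq_map
      (fun r => if PySem.Chars.isdigit r then look_like_letter.getD r 'A' else r)]
    rw [List.nil_append, List.nil_append]
    have hlen4 : ((buf.take 4).map
        (fun r => if PySem.Chars.isdigit r then look_like_letter.getD r 'A' else r)).length = 4 := by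
      simp; omega
    rw [fcA_tail_eq buf (buf.length - 4) 4 _ (by omega) hlen4]
    rw [fcMapFrom_split (buf.take 11) 0]
    rw [Nat.sub_zero, List.take_take, List.drop_take]
    norm_num
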